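-- pv_equiv track=rewrite | github.com/samMeow/FacebookHackerCup | 2021/Round1/weakA.py | solution
-- ===== SOURCE A (Python) =====
-- def solution(str):
--     last = ''
--     change = 0
--     for c in str:
--         if c == 'X' and last in ['O', '']:
--             change += 1
--             last = 'X'
--         elif c == 'O' and last in ['X', '']:
--             change += 1
--             last = 'O'
--     return max(change - 1, 0)
-- ===== SOURCE B (Python) =====
-- def solution(str):
--     xo = [c for c in str if c in ('X', 'O')]
--     return sum(a != b for a, b in zip(xo, xo[1:]))
-- ===== Notes on version B (the rewrite author's own statement) =====
-- stated objective: simpler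
-- what changed: Replaces A's stateful last-character/change-counter machine with a filter of the X/O subsequence followed by a pairwise zip comparison counting adjacent differing pairs.
import Mathlib
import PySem

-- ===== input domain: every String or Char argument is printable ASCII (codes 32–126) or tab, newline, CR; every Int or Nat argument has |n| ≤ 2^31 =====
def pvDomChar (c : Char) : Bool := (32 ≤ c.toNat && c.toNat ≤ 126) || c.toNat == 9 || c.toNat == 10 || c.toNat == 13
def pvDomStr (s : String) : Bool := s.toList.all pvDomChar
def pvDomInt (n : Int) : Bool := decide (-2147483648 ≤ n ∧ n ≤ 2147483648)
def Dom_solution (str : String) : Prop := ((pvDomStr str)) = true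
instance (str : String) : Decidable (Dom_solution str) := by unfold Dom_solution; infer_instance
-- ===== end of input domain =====

-- B replaces A's stateful last/change loop by filter-the-X/O-subsequence then count adjacent differing pairs (simpler decomposition).

-- ===== PORT A =====
-- state machine: (last, change); branches in A's order
def solutionStep (s : String × Int) (c : Char) : String × Int :=
  if c == 'X' && (s.1 == "O" || s.1 == "") then ("X", s.2 + 1)
  else if c == 'O' && (s.1 == "X" || s.1 == "") then ("O", s.2 + 1)
  else s

def solution (str : String) : Int :=
  let r := str.toList.foldl solutionStep ("", 0)
  max (r.2 - 1) 0

-- ===== PORT B =====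
def solution_alt (str : String) : Int :=
  let xo := str.toList.filter (fun c => c == 'X' || c == 'O')
  ((xo.zip xo.tail).map (fun ab => if ab.1 ≠ ab.2 then (1 : Int) else 0)).sum

-- ===== PRECONDITION & SPEC =====
def Spec_solution (str : String) (out : Int) : Prop := out = solution_alt str
instance (str : String) (out : Int) : Decidable (Spec_solution str out) := by unfold Spec_solution; infer_instance

-- ===== CLAIM (what is proved, stated in full; the proofs are below) =====
def Claim_equal_solution : Prop := ∀ (str : String), Dom_solution str → Spec_solution str (solution str)

-- ===== LEMMAS AND PROOFS =====

-- A's step ignores characters other than 'X'/'O'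
theorem solutionStep_skip (s : String × Int) (c : Char)
    (h : (c == 'X' || c == 'O') = false) : solutionStep s c = s := by
  simp only [Bool.or_eq_false_iff] at h
  simp [solutionStep, h.1, h.2]

-- A's fold over l equals the fold over the X/O-filtered list
theorem foldl_filter_XO (l : List Char) (s : String × Int) :
    l.foldl solutionStep s = (l.filter (fun c => c == 'X' || c == 'O')).foldl solutionStep s := by
  induction l generalizing s with
  | nil => rfl
  | cons c t ih =>
    by_cases h : (c == 'X' || c == 'O') = true
    · simp [h, ih]
    · simp only [Bool.not_eq_true] at h
      simp [h, solutionStep_skip s c h, ih]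

def strOf (a : Char) : String := if a = 'X' then "X" else "O"

-- pairwise diff count of a::t, in recursive form
def countDiff (a : Char) : List Char → Int
  | [] => 0
  | b :: t => (if b ≠ a then 1 else 0) + countDiff b t

theorem step_XO (a b : Char) (n : Int) (ha : a = 'X' ∨ a = 'O') (hb : b = 'X' ∨ b = 'O') :
    solutionStep (strOf a, n) b = (strOf b, n + if b ≠ a then 1 else 0) := by
  rcases ha with rfl | rfl <;> rcases hb with rfl | rfl <;> simp [solutionStep, strOf]

-- main fold invariant on all-X/O lists
theorem foldl_XO (t : List Char) (a : Char) (n : Int)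
    (ha : a = 'X' ∨ a = 'O') (ht : ∀ c ∈ t, c = 'X' ∨ c = 'O') :
    (t.foldl solutionStep (strOf a, n)).2 = n + countDiff a t := by
  induction t generalizing a n with
  | nil => simp [countDiff]
  | cons b t ih =>
    have hb := ht b (by simp)
    simp only [List.foldl_cons, step_XO a b n ha hb, countDiff]
    rw [ih b _ hb (fun c hc => ht c (by simp [hc]))]
    ring

-- B's zip-map-sum equals countDiff
theorem zipSum_eq_countDiff (a : Char) (t : List Char) :
    (((a :: t).zip t).map (fun ab => if ab.1 ≠ ab.2 then (1 : Int) else 0)).sum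
      = countDiff a t := by
  induction t generalizing a with
  | nil => simp [countDiff]
  | cons b t ih =>
    simp only [List.zip_cons_cons, List.map_cons, List.sum_cons, ih b, countDiff, ne_comm]

theorem all_filter_XO (l : List Char) :
    ∀ c ∈ l.filter (fun c => c == 'X' || c == 'O'), c = 'X' ∨ c = 'O' := by
  intro c hc
  have := List.of_mem_filter hc
  simpa using this

theorem countDiff_nonneg (t : List Char) (a : Char) : 0 ≤ countDiff a t := by
  induction t generalizing a with
  | nil => simp [countDiff]
  | cons b t ih =>
    have := ih b
    simp only [countDiff]
    by_cases h : b ≠ a <;> simp [h] <;> omega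

-- ===== VERDICT (by name: the statement is the Claim_ definition above) =====
theorem solution_spec : Claim_equal_solution := by
  intro str _
  unfold Spec_solution solution solution_alt
  rw [foldl_filter_XO]
  have hall : ∀ c ∈ str.toList.filter (fun c => c == 'X' || c == 'O'), c = 'X' ∨ c = 'O' :=
    all_filter_XO _
  cases hxs : str.toList.filter (fun c => c == 'X' || c == 'O') with
  | nil => simp
  | cons a t =>
    rw [hxs] at hall
    have ha := hall a (by simp)
    have ht : ∀ c ∈ t, c = 'X' ∨ c = 'O' := fun c hc => hall c (by simp [hc])
    have hstep : solutionStep ("", 0) a = (strOf a, 1) := by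
      rcases ha with rfl | rfl <;> simp [solutionStep, strOf]
    simp only [List.foldl_cons, hstep]
    rw [foldl_XO t a 1 ha ht]
    simp only [List.tail_cons, zipSum_eq_countDiff]
    have := countDiff_nonneg t a
    omega
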